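-- pv_equiv track=rewrite | github.com/mohangowdakm03-crypto/AI-Interview-Simulator | evaluator.py | stem_token
-- ===== SOURCE A (Python) =====
-- def stem_token(token: str) -> str:
--     """Very small rule-based stemmer to keep matching dependency-free."""
--     if len(token) <= 3:
--         return token
--     if token.endswith("ization") and len(token) > 8:
--         return token[:-7] + "ize"
--     if token.endswith("isation") and len(token) > 8:
--         return token[:-7] + "ize"
--     if token.endswith("tion") and len(token) > 6:
--         return token[:-4]
--     if token.endswith("ies") and len(token) > 4:
--         return token[:-3] + "i"
--     for suffix, cut in (("ingly", 5), ("ing", 3), ("edly", 4), ("ed", 2), ("ly", 2)):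
--         if token.endswith(suffix) and len(token) > cut + 2:
--             return token[:-cut]
--     if token.endswith("es") and len(token) > 4:
--         return token[:-2]
--     if token.endswith("s") and len(token) > 3:
--         return token[:-1]
--     return token
-- ===== SOURCE B (Python) =====
-- def stem_token(token: str) -> str:
--     """Very small rule-based stemmer, as a decision tree over the reversed token:
--     each trailing character is inspected once to dispatch among the suffix rules."""
--     n = len(token)
--     if n <= 3:
--         return token
--     r = token[::-1]
--     if r[0] == 'n':
--         if r[1] == 'o' and r[2] == 'i' and r[3] == 't':
--             if n > 8 and r[4] == 'a' and (r[5] == 'z' or r[5] == 's') and r[6] == 'i':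
--                 return token[: n - 7] + "ize"
--             if n > 6:
--                 return token[: n - 4]
--         return token
--     if r[0] == 's':
--         if r[1] == 'e' and n > 4:
--             if r[2] == 'i':
--                 return token[: n - 3] + "i"
--             return token[: n - 2]
--         return token[: n - 1]
--     if r[0] == 'y':
--         if r[1] == 'l':
--             if n > 7 and r[2] == 'g' and r[3] == 'n' and r[4] == 'i':
--                 return token[: n - 5]
--             if n > 6 and r[2] == 'd' and r[3] == 'e':
--                 return token[: n - 4]
--             if n > 4:
--                 return token[: n - 2]
--         return token
--     if r[0] == 'g':
--         if r[1] == 'n' and r[2] == 'i' and n > 5: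
--             return token[: n - 3]
--         return token
--     if r[0] == 'd':
--         if r[1] == 'e' and n > 4:
--             return token[: n - 2]
--         return token
--     return token
-- ===== Notes on version B (the rewrite author's own statement) =====
-- stated objective: alternative
-- what changed: Replaces A's ordered chain of eleven endswith-rule checks (each rescanning the token's suffix) by a decision tree over the reversed token: B reverses the token once and dispatches on individual trailing characters, each inspected once, with positive slicing token[:n-cut] instead of A's negative slicing.
import Mathlib
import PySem

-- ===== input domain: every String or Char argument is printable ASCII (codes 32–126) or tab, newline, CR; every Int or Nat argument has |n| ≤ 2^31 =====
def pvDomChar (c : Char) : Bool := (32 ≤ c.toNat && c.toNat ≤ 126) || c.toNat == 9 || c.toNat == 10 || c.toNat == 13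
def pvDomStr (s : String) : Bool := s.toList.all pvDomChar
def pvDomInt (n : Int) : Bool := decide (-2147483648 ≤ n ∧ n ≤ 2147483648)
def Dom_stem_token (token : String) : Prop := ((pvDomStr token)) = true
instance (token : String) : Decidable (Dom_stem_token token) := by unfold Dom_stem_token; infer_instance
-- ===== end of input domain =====

-- B replaces A's ordered endswith-rule chain by a decision tree over the reversed token
-- (each trailing character inspected once to dispatch among the rules); same cost, different structure.

-- ===== PORT A =====
-- the for-loop over (("ingly",5),("ing",3),("edly",4),("ed",2),("ly",2)) with early return
def stemTokenLoopA : List (String × Int) → String → Option String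
  | [], _ => none
  | (suffix, cut) :: rest, token =>
    if PySem.Str.endswith token suffix = true ∧ cut + 2 < PySem.Str.len token then
      some (String.ofList (PySem.List.slice token.toList none (some (-cut))))
    else stemTokenLoopA rest token

def stem_token (token : String) : String :=
  if PySem.Str.len token ≤ 3 then token
  else if PySem.Str.endswith token "ization" = true ∧ 8 < PySem.Str.len token then
    String.ofList (PySem.List.slice token.toList none (some (-7)) ++ "ize".toList)
  else if PySem.Str.endswith token "isation" = true ∧ 8 < PySem.Str.len token then
    String.ofList (PySem.List.slice token.toList none (some (-7)) ++ "ize".toList)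
  else if PySem.Str.endswith token "tion" = true ∧ 6 < PySem.Str.len token then
    String.ofList (PySem.List.slice token.toList none (some (-4)))
  else if PySem.Str.endswith token "ies" = true ∧ 4 < PySem.Str.len token then
    String.ofList (PySem.List.slice token.toList none (some (-3)) ++ "i".toList)
  else match stemTokenLoopA [("ingly", 5), ("ing", 3), ("edly", 4), ("ed", 2), ("ly", 2)] token with
  | some r => r
  | none =>
    if PySem.Str.endswith token "es" = true ∧ 4 < PySem.Str.len token then
      String.ofList (PySem.List.slice token.toList none (some (-2)))
    else if PySem.Str.endswith token "s" = true ∧ 3 < PySem.Str.len token then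
      String.ofList (PySem.List.slice token.toList none (some (-1)))
    else token

-- ===== PORT B =====
-- Source B: r = token[::-1]; nested decision tree on r[0], r[1], …; returns token[:n-cut] (+ append).
-- r[i] is only evaluated at in-range indices (n ≥ 4, deeper reads guarded by n > 7 / n > 8),
-- so Python's r[i] is ported as List.getD with a dummy default.
def stem_token_alt (token : String) : String :=
  let n := PySem.Str.len token
  if n ≤ 3 then token
  else
    let r := token.toList.reverse
    let a : Nat → Char := fun i => r.getD i ' '
    let cut : Int → List Char := fun k => PySem.List.slice token.toList none (some (n - k))
    if a 0 = 'n' then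
      if a 1 = 'o' ∧ a 2 = 'i' ∧ a 3 = 't' then
        if 8 < n ∧ a 4 = 'a' ∧ (a 5 = 'z' ∨ a 5 = 's') ∧ a 6 = 'i' then
          String.ofList (cut 7 ++ "ize".toList)
        else if 6 < n then String.ofList (cut 4)
        else token
      else token
    else if a 0 = 's' then
      if a 1 = 'e' ∧ 4 < n then
        if a 2 = 'i' then String.ofList (cut 3 ++ "i".toList)
        else String.ofList (cut 2)
      else String.ofList (cut 1)
    else if a 0 = 'y' then
      if a 1 = 'l' then
        if 7 < n ∧ a 2 = 'g' ∧ a 3 = 'n' ∧ a 4 = 'i' then String.ofList (cut 5)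
        else if 6 < n ∧ a 2 = 'd' ∧ a 3 = 'e' then String.ofList (cut 4)
        else if 4 < n then String.ofList (cut 2)
        else token
      else token
    else if a 0 = 'g' then
      if a 1 = 'n' ∧ a 2 = 'i' ∧ 5 < n then String.ofList (cut 3)
      else token
    else if a 0 = 'd' then
      if a 1 = 'e' ∧ 4 < n then String.ofList (cut 2)
      else token
    else token

-- ===== PRECONDITION & SPEC =====
def Spec_stem_token (token : String) (out : String) : Prop := out = stem_token_alt token
instance (token : String) (out : String) : Decidable (Spec_stem_token token out) := by unfold Spec_stem_token; infer_instance

-- ===== CLAIM (what is proved, stated in full; the proofs are below) =====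
def Claim_equal_stem_token : Prop := ∀ (token : String), Dom_stem_token token → Spec_stem_token token (stem_token token)

-- ===== LEMMAS AND PROOFS =====
lemma pv_endswith_rev (L p q : List Char) (hq : p.reverse = q) :
    (PySem.Chars.endswith L p = true) ↔ q <+: L.reverse := by
  rw [PySem.Chars.endswith_iff, ← List.reverse_prefix, hq]

lemma pv_slice_shift (L : List Char) (k n : Int) (hn : n = (L.length : Int))
    (h1 : 0 < k) (h2 : k ≤ n) :
    PySem.List.slice L none (some (-k)) = PySem.List.slice L none (some (n - k)) := by
  obtain ⟨m, rfl⟩ : ∃ m : Nat, k = (m : Int) := ⟨k.toNat, (Int.toNat_of_nonneg h1.le).symm⟩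
  have hm : 0 < m := by exact_mod_cast h1
  rw [PySem.List.slice_to_neg_natCast L m hm]
  have h3 : n - m = ((L.length - m : Nat) : Int) := by omega
  rw [h3, PySem.List.slice_to_natCast]


-- ===== VERDICT (by name: the statement is the Claim_ definition above) =====
set_option maxHeartbeats 1000000 in
theorem stem_token_spec : Claim_equal_stem_token := by
  intro token _
  unfold Spec_stem_token
  unfold stem_token stem_token_alt
  simp only [stemTokenLoopA]
  simp only [PySem.Str.endswith_eq, PySem.Str.len_eq]
  by_cases h0 : ((token.toList.length : Int)) ≤ 3
  · simp only [if_pos h0]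
  simp only [if_neg h0]
  have hLen : token.toList.length = token.length := by simp
  have h3N : (3 : Int) < (token.toList.length : Int) := by omega
  obtain ⟨c0, c1, c2, c3, rest, hr⟩ :
      ∃ c0 c1 c2 c3 rest, token.toList.reverse = c0 :: c1 :: c2 :: c3 :: rest := by
    have hrl : 4 ≤ token.toList.reverse.length := by rw [List.length_reverse]; omega
    rcases hR : token.toList.reverse with _ | ⟨a, t1⟩
    · rw [hR] at hrl; simp at hrl
    rcases t1 with _ | ⟨b, t2⟩
    · rw [hR] at hrl; simp at hrl
    rcases t2 with _ | ⟨c, t3⟩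
    · rw [hR] at hrl; simp at hrl
    rcases t3 with _ | ⟨d, t4⟩
    · rw [hR] at hrl; simp at hrl
    exact ⟨a, b, c, d, t4, rfl⟩
  have hrest : (rest.length : Int) = (token.toList.length : Int) - 4 := by
    have := congrArg List.length hr
    rw [List.length_reverse] at this
    simp only [List.length_cons] at this
    omega
  have E1 : PySem.Chars.endswith token.toList "ization".toList = true ↔
      (c0 = 'n' ∧ c1 = 'o' ∧ c2 = 'i' ∧ c3 = 't' ∧ ['a','z','i'] <+: rest) := by
    rw [pv_endswith_rev _ _ ['n','o','i','t','a','z','i'] (by decide), hr]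
    simp [List.cons_prefix_cons, eq_comm]
  have E2 : PySem.Chars.endswith token.toList "isation".toList = true ↔
      (c0 = 'n' ∧ c1 = 'o' ∧ c2 = 'i' ∧ c3 = 't' ∧ ['a','s','i'] <+: rest) := by
    rw [pv_endswith_rev _ _ ['n','o','i','t','a','s','i'] (by decide), hr]
    simp [List.cons_prefix_cons, eq_comm]
  have E3 : PySem.Chars.endswith token.toList "tion".toList = true ↔
      (c0 = 'n' ∧ c1 = 'o' ∧ c2 = 'i' ∧ c3 = 't') := by
    rw [pv_endswith_rev _ _ ['n','o','i','t'] (by decide), hr]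
    simp [List.cons_prefix_cons, eq_comm]
  have E4 : PySem.Chars.endswith token.toList "ies".toList = true ↔
      (c0 = 's' ∧ c1 = 'e' ∧ c2 = 'i') := by
    rw [pv_endswith_rev _ _ ['s','e','i'] (by decide), hr]
    simp [List.cons_prefix_cons, eq_comm]
  have E5 : PySem.Chars.endswith token.toList "ingly".toList = true ↔
      (c0 = 'y' ∧ c1 = 'l' ∧ c2 = 'g' ∧ c3 = 'n' ∧ ['i'] <+: rest) := by
    rw [pv_endswith_rev _ _ ['y','l','g','n','i'] (by decide), hr]
    simp [List.cons_prefix_cons, eq_comm]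
  have E6 : PySem.Chars.endswith token.toList "ing".toList = true ↔
      (c0 = 'g' ∧ c1 = 'n' ∧ c2 = 'i') := by
    rw [pv_endswith_rev _ _ ['g','n','i'] (by decide), hr]
    simp [List.cons_prefix_cons, eq_comm]
  have E7 : PySem.Chars.endswith token.toList "edly".toList = true ↔
      (c0 = 'y' ∧ c1 = 'l' ∧ c2 = 'd' ∧ c3 = 'e') := by
    rw [pv_endswith_rev _ _ ['y','l','d','e'] (by decide), hr]
    simp [List.cons_prefix_cons, eq_comm]
  have E8 : PySem.Chars.endswith token.toList "ed".toList = true ↔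
      (c0 = 'd' ∧ c1 = 'e') := by
    rw [pv_endswith_rev _ _ ['d','e'] (by decide), hr]
    simp [List.cons_prefix_cons, eq_comm]
  have E9 : PySem.Chars.endswith token.toList "ly".toList = true ↔
      (c0 = 'y' ∧ c1 = 'l') := by
    rw [pv_endswith_rev _ _ ['y','l'] (by decide), hr]
    simp [List.cons_prefix_cons, eq_comm]
  have E10 : PySem.Chars.endswith token.toList "es".toList = true ↔
      (c0 = 's' ∧ c1 = 'e') := by
    rw [pv_endswith_rev _ _ ['s','e'] (by decide), hr]
    simp [List.cons_prefix_cons, eq_comm]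
  have E11 : PySem.Chars.endswith token.toList "s".toList = true ↔ (c0 = 's') := by
    rw [pv_endswith_rev _ _ ['s'] (by decide), hr]
    simp [List.cons_prefix_cons, eq_comm]
  simp only [E1, E2, E3, E4, E5, E6, E7, E8, E9, E10, E11, hr, h3N, and_true, true_and,
    show ((5:Int)+2 = 7) from by norm_num, show ((3:Int)+2 = 5) from by norm_num,
    show ((4:Int)+2 = 6) from by norm_num, show ((2:Int)+2 = 4) from by norm_num]
  clear h0 E1 E2 E3 E4 E5 E6 E7 E8 E9 E10 E11 hr hLen
  -- follow B's decision tree with by_cases; each decided character is substituted,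
  -- which collapses the corresponding rules on A's side
  by_cases b0 : c0 = 'n'
  case pos =>
    subst b0
    simp only [List.getD_cons_zero, List.getD_cons_succ, Char.reduceEq, false_and, and_false,
      if_false, true_and, and_true, if_true]
    by_cases b1 : c1 = 'o' ∧ c2 = 'i' ∧ c3 = 't'
    case pos =>
      obtain ⟨rfl, rfl, rfl⟩ := b1
      simp only [Char.reduceEq, true_and, and_true, if_true, false_and, and_false, if_false]
      by_cases b8 : (8 : Int) < (token.toList.length : Int)
      case pos =>
        obtain ⟨d0, d1, d2, rest', rfl⟩ : ∃ d0 d1 d2 rest', rest = d0 :: d1 :: d2 :: rest' := by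
          rcases rest with _ | ⟨d0, _ | ⟨d1, _ | ⟨d2, r⟩⟩⟩
          · exfalso; simp only [List.length_nil] at hrest; omega
          · exfalso; simp only [List.length_cons, List.length_nil] at hrest; push_cast at hrest; omega
          · exfalso; simp only [List.length_cons, List.length_nil] at hrest; push_cast at hrest; omega
          · exact ⟨_, _, _, _, rfl⟩
        simp only [List.getD_cons_zero, List.getD_cons_succ, List.cons_prefix_cons,
          List.nil_prefix, and_true, true_and, eq_comm (α := Char), b8]
        by_cases bz : d0 = 'a' ∧ d1 = 'z' ∧ d2 = 'i'
        · obtain ⟨rfl, rfl, rfl⟩ := bz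
          simp only [Char.reduceEq, true_and, and_true, if_true, false_and, and_false,
            false_or, true_or, or_false, or_true, if_false]
          rw [pv_slice_shift token.toList 7 _ rfl (by norm_num) (by omega)]
        · by_cases bs : d0 = 'a' ∧ d1 = 's' ∧ d2 = 'i'
          · obtain ⟨rfl, rfl, rfl⟩ := bs
            simp only [Char.reduceEq, true_and, and_true, if_true, false_and, and_false,
              false_or, true_or, or_false, or_true, if_false]
            rw [pv_slice_shift token.toList 7 _ rfl (by norm_num) (by omega)]
          · simp only [eq_false bz, eq_false bs,
              eq_false (show ¬(d0 = 'a' ∧ (d1 = 'z' ∨ d1 = 's') ∧ d2 = 'i') from by tauto),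
              (show (6 : Int) < (token.toList.length : Int) from by omega),
              false_and, and_false, if_false, true_and, and_true, if_true]
            rw [pv_slice_shift token.toList 4 _ rfl (by norm_num) (by omega)]
      case neg =>
        simp only [eq_false b8, false_and, and_false, if_false]
        by_cases b6 : (6 : Int) < (token.toList.length : Int)
        · simp only [b6, if_true, true_and, and_true]
          rw [pv_slice_shift token.toList 4 _ rfl (by norm_num) (by omega)]
        · simp only [eq_false b6, if_false, and_false, false_and]
    case neg =>
      rw [if_neg (by tauto), if_neg (by tauto), if_neg (by tauto), if_neg b1]
  case neg =>
    simp only [List.getD_cons_zero, List.getD_cons_succ, eq_false b0, false_and, if_false,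
      and_false]
    by_cases bs0 : c0 = 's'
    case pos =>
      subst bs0
      simp only [Char.reduceEq, false_and, and_false, if_false, true_and, and_true, if_true]
      by_cases be : c1 = 'e' ∧ 4 < (token.toList.length : Int)
      case pos =>
        obtain ⟨rfl, h4N⟩ := be
        simp only [Char.reduceEq, true_and, and_true, h4N, if_true]
        by_cases bi : c2 = 'i'
        · subst bi
          simp only [Char.reduceEq, true_and, and_true, if_true]
          rw [pv_slice_shift token.toList 3 _ rfl (by norm_num) (by omega)]
        · simp only [eq_false bi, false_and, and_false, if_false, if_true]
          rw [pv_slice_shift token.toList 2 _ rfl (by norm_num) (by omega)]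
      case neg =>
        simp only [eq_false be,
          eq_false (show ¬((c1 = 'e' ∧ c2 = 'i') ∧ 4 < (token.toList.length : Int)) from by tauto),
          false_and, and_false, if_false, true_and, and_true, if_true]
        rw [pv_slice_shift token.toList 1 _ rfl (by norm_num) (by omega)]
    case neg =>
      simp only [eq_false bs0, false_and, if_false, and_false]
      by_cases by0 : c0 = 'y'
      case pos =>
        subst by0
        simp only [Char.reduceEq, false_and, and_false, if_false, true_and, and_true, if_true]
        by_cases bl : c1 = 'l'
        case pos =>
          subst bl
          simp only [Char.reduceEq, true_and, and_true, if_true]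
          by_cases b7 : (7 : Int) < (token.toList.length : Int)
          case pos =>
            obtain ⟨d0, rest', rfl⟩ : ∃ d0 rest', rest = d0 :: rest' := by
              rcases rest with _ | ⟨d0, r⟩
              · exfalso; simp only [List.length_nil] at hrest; omega
              · exact ⟨_, _, rfl⟩
            simp only [List.getD_cons_zero, List.getD_cons_succ, List.cons_prefix_cons,
              List.nil_prefix, and_true, true_and, eq_comm (α := Char), b7]
            by_cases bg : c2 = 'g' ∧ c3 = 'n' ∧ d0 = 'i'
            · obtain ⟨rfl, rfl, rfl⟩ := bg
              simp only [Char.reduceEq, true_and, and_true, if_true]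
              rw [pv_slice_shift token.toList 5 _ rfl (by norm_num) (by omega)]
            · simp only [eq_false bg, false_and, and_false, if_false, true_and, and_true]
              by_cases bd : c2 = 'd' ∧ c3 = 'e'
              · obtain ⟨rfl, rfl⟩ := bd
                simp only [Char.reduceEq, true_and, and_true,
                  (show (6 : Int) < (token.toList.length : Int) from by omega), if_true]
                rw [pv_slice_shift token.toList 4 _ rfl (by norm_num) (by omega)]
              · simp only [eq_false bd, false_and, and_false, if_false,
                  (show (4 : Int) < (token.toList.length : Int) from by omega),
                  (show (6 : Int) < (token.toList.length : Int) from by omega),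
                  true_and, and_true, if_true]
                rw [pv_slice_shift token.toList 2 _ rfl (by norm_num) (by omega)]
          case neg =>
            simp only [eq_false b7, false_and, and_false, if_false]
            by_cases b6 : (6 : Int) < (token.toList.length : Int)
            · simp only [b6, true_and, and_true]
              by_cases bd : c2 = 'd' ∧ c3 = 'e'
              · obtain ⟨rfl, rfl⟩ := bd
                simp only [Char.reduceEq, true_and, and_true, if_true]
                rw [pv_slice_shift token.toList 4 _ rfl (by norm_num) (by omega)]
              · simp only [eq_false bd, false_and, and_false, if_false,
                  (show (4 : Int) < (token.toList.length : Int) from by omega),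
                  true_and, and_true, if_true]
                rw [pv_slice_shift token.toList 2 _ rfl (by norm_num) (by omega)]
            · simp only [eq_false b6, false_and, and_false, if_false]
              by_cases b4 : (4 : Int) < (token.toList.length : Int)
              · simp only [b4, true_and, and_true, if_true]
                rw [pv_slice_shift token.toList 2 _ rfl (by norm_num) (by omega)]
              · simp only [eq_false b4, false_and, and_false, if_false]
        case neg =>
          simp only [eq_false bl, false_and, and_false, if_false]
      case neg =>
        simp only [eq_false by0, false_and, if_false, and_false]
        by_cases bg0 : c0 = 'g'
        case pos =>
          subst bg0
          simp only [Char.reduceEq, false_and, and_false, if_false, true_and, and_true, if_true]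
          by_cases b5 : (5 : Int) < (token.toList.length : Int)
          · simp only [b5, and_true, true_and]
            by_cases bni : c1 = 'n' ∧ c2 = 'i'
            · obtain ⟨rfl, rfl⟩ := bni
              simp only [Char.reduceEq, true_and, and_true, if_true]
              rw [pv_slice_shift token.toList 3 _ rfl (by norm_num) (by omega)]
            · simp only [eq_false bni, if_false]
          · simp only [eq_false b5, and_false, false_and, if_false]
        case neg =>
          simp only [eq_false bg0, false_and, if_false, and_false]
          by_cases bd0 : c0 = 'd'
          case pos =>
            subst bd0
            simp only [Char.reduceEq, false_and, and_false, if_false, true_and, and_true, if_true]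
            by_cases bed : c1 = 'e' ∧ 4 < (token.toList.length : Int)
            · obtain ⟨rfl, h4N⟩ := bed
              simp only [Char.reduceEq, h4N, true_and, and_true, if_true]
              rw [pv_slice_shift token.toList 2 _ rfl (by norm_num) (by omega)]
            · simp only [eq_false bed, if_false]
          case neg =>
            simp only [eq_false bd0, false_and, if_false, and_false]
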